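-- pv_equiv track=rewrite | github.com/davidetsm/Examens-Programacio | 2020-2021/2020-12-2/ej1.py | manipula
-- ===== SOURCE A (Python) =====
-- def manipula(cadena):
--
--     cadena_invertida = ""
--     for letra in cadena:
--         cadena_invertida = letra + cadena_invertida
--
--     cadena_solucion = ""
--     for letra in cadena_invertida:
--         if letra not in cadena_solucion:
--             cadena_solucion += letra
--
--     return cadena_solucion
-- ===== SOURCE B (Python) =====
-- def manipula(cadena):
--     ultimo = {}
--     for i, letra in enumerate(cadena):
--         ultimo[letra] = i
--     pares = sorted(ultimo.items(), key=lambda kv: kv[1], reverse=True)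
--     return "".join(letra for letra, _ in pares)
-- ===== Notes on version B (the rewrite author's own statement) =====
-- stated objective: faster
-- what changed: A builds the reversed string by repeated prepending (quadratic string copying) and then dedups it with a linear membership scan of the growing output; B makes one enumerate pass recording each character's last index in a dict and sorts the dict items by index descending, joining the keys.
import Mathlib
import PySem

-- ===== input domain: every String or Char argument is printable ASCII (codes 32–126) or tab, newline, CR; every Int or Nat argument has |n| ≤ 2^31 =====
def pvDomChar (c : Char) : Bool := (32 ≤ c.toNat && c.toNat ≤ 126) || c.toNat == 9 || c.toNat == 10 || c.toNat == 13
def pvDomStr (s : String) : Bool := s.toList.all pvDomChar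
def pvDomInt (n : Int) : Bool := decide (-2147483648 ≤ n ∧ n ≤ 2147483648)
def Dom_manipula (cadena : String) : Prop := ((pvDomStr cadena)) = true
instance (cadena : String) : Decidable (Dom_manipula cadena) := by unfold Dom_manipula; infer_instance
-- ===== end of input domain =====

-- B replaces A's "build the reversed string by repeated prepending, then scan it rejecting
-- duplicates" with "one pass recording each character's last index, then sort that table by
-- index descending and join the keys".

-- ===== PORT A =====
def manipula (cadena : String) : String :=
  -- cadena_invertida = "";  for letra in cadena: cadena_invertida = letra + cadena_invertida
  let invertida : List Char := cadena.toList.foldl (fun acc letra => letra :: acc) []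
  -- cadena_solucion = "";  for letra in cadena_invertida: if letra not in cadena_solucion: cadena_solucion += letra
  let solucion : List Char :=
    invertida.foldl (fun sol letra => if letra ∉ sol then sol ++ [letra] else sol) []
  String.ofList solucion

-- ===== PORT B =====
def manipula_alt (cadena : String) : String :=
  -- ultimo = {};  for i, letra in enumerate(cadena): ultimo[letra] = i
  let ultimo : PySem.Dict Char Int :=
    (PySem.List.enumerate cadena.toList 0).foldl (fun d p => d.insert p.2 p.1) PySem.Dict.empty
  -- pares = sorted(ultimo.items(), key=lambda kv: kv[1], reverse=True)
  let pares := PySem.List.sorted ultimo.items (fun kv => kv.2) true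
  -- return "".join(letra for letra, _ in pares)
  PySem.Str.join "" (pares.map (fun kv => String.ofList [kv.1]))

-- ===== PRECONDITION & SPEC =====
def Spec_manipula (cadena : String) (out : String) : Prop := out = manipula_alt cadena
instance (cadena : String) (out : String) : Decidable (Spec_manipula cadena out) := by unfold Spec_manipula; infer_instance

-- ===== CLAIM (what is proved, stated in full; the proofs are below) =====
def Claim_equal_manipula : Prop := ∀ (cadena : String), Dom_manipula cadena → Spec_manipula cadena (manipula cadena)

-- ===== LEMMAS AND PROOFS =====

-- reference value: dedup keeping the first occurrence, written structurally (proof-only helper)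
def dedupRev : List Char → List Char
  | [] => []
  | c :: r => c :: (dedupRev r).filter (fun x => decide (x ≠ c))

-- A's dedup loop computes dedupRev
theorem foldl_dedup_eq (xs : List Char) : ∀ (acc : List Char),
    xs.foldl (fun sol letra => if letra ∉ sol then sol ++ [letra] else sol) acc
      = acc ++ (dedupRev xs).filter (fun x => decide (x ∉ acc)) := by
  induction xs with
  | nil => intro acc; simp [dedupRev]
  | cons c t ih =>
    intro acc
    simp only [List.foldl_cons, dedupRev, List.filter_cons]
    by_cases hc : c ∈ acc
    · rw [if_neg (by simp [hc]), show decide (c ∉ acc) = false by simp [hc], ih,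
        List.filter_filter]
      simp only [Bool.false_eq_true, if_false]
      exact congrArg (acc ++ ·) (List.filter_congr fun x _ => by
        by_cases hxc : x = c <;> simp [hxc, hc])
    · rw [if_pos (by simp [hc]), show decide (c ∉ acc) = true by simp [hc], ih,
        List.filter_filter]
      simp only [if_pos]
      rw [List.append_assoc, List.singleton_append]
      exact congrArg (acc ++ ·) (congrArg (c :: ·) (List.filter_congr fun x _ => by
        by_cases hxc : x = c <;> simp [hxc, hc]))

-- the dictionary B builds, as a function of the character list
def dictOf (l : List Char) : PySem.Dict Char Int :=
  (PySem.List.enumerate l 0).foldl (fun d p => d.insert p.2 p.1) PySem.Dict.empty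

theorem dictOf_append (l : List Char) (c : Char) :
    dictOf (l ++ [c]) = (dictOf l).insert c (l.length : Int) := by
  simp [dictOf, PySem.List.enumerate_append, PySem.List.enumerate_cons, PySem.List.enumerate_nil]

theorem dictOf_keys_nodup (l : List Char) : (dictOf l).keys.Nodup := by
  unfold dictOf
  exact PySem.Dict.nodup_keys_foldl_insert_key (PySem.List.enumerate l 0) (fun p => p.2)
    (fun _ p => p.1) PySem.Dict.empty PySem.Dict.nodup_keys_empty

theorem dictOf_values_range (l : List Char) :
    ∀ p ∈ (dictOf l).items, 0 ≤ p.2 ∧ p.2 < (l.length : Int) := by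
  induction l using List.reverseRecOn with
  | nil => intro p hp; simp [dictOf, PySem.Dict.empty] at hp
  | append_singleton l c ih =>
    intro p hp
    rw [dictOf_append] at hp
    rcases (PySem.Dict.mem_items_insert _ _ _ _).mp hp with h | ⟨h, _⟩
    · subst h; simp
    · have := ih p h; simp only [List.length_append, List.length_cons, List.length_nil]
      push_cast; omega

-- replacing the unique entry keyed c is, up to permutation, removing it and consing the new pair
theorem map_replace_perm (c : Char) (n : Int) : ∀ (ts : List (Char × Int)),
    (ts.map (fun p => p.1)).Nodup → c ∈ ts.map (fun p => p.1) →
    (ts.map (fun p => if p.1 == c then (c, n) else p)).Perm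
      ((c, n) :: ts.filter (fun p => decide (p.1 ≠ c))) := by
  intro ts
  induction ts with
  | nil => simp
  | cons q t ih =>
    intro hnd hmem
    simp only [List.map_cons, List.nodup_cons] at hnd
    simp only [List.map_cons, List.filter_cons]
    by_cases hq : q.1 = c
    · have hnot : ∀ p ∈ t, p.1 ≠ c := by
        intro p hp he
        exact hnd.1 (List.mem_map.mpr ⟨p, hp, by rw [he, hq]⟩)
      rw [if_pos (by simp [hq]), show decide (q.1 ≠ c) = false by simp [hq]]
      simp only [Bool.false_eq_true, if_false]
      rw [List.map_congr_left (fun p hp => by rw [if_neg (by simp [hnot p hp])]),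
        List.filter_eq_self.mpr (fun p hp => by simp [hnot p hp])]
      simp
    · have hmem' : c ∈ t.map (fun p => p.1) := by
        rcases List.mem_map.mp hmem with ⟨p, hp, he⟩
        rcases List.mem_cons.mp hp with rfl | hp'
        · exact absurd he hq
        · exact List.mem_map.mpr ⟨p, hp', he⟩
      rw [if_neg (by simp [hq]), show decide (q.1 ≠ c) = true by simp [hq]]
      simp only [if_pos]
      exact ((ih hnd.2 hmem').cons q).trans (List.Perm.swap (c, n) q _)

theorem dictOf_items_perm (l : List Char) (c : Char) :
    (dictOf (l ++ [c])).items.Perm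
      ((c, (l.length : Int)) :: (dictOf l).items.filter (fun p => decide (p.1 ≠ c))) := by
  rw [dictOf_append, PySem.Dict.items_insert]
  by_cases hcont : (dictOf l).contains c = true
  · rw [if_pos hcont]
    have hkeys : ((dictOf l).items.map (fun p => p.1)).Nodup := by
      have := dictOf_keys_nodup l
      simpa [PySem.Dict.keys] using this
    have hmem : c ∈ (dictOf l).items.map (fun p => p.1) := by
      have := (PySem.Dict.contains_iff_mem_keys _ _).mp hcont
      simpa [PySem.Dict.keys] using this
    exact map_replace_perm c _ _ hkeys hmem
  · rw [if_neg hcont]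
    have hfil : (dictOf l).items.filter (fun p => decide (p.1 ≠ c)) = (dictOf l).items := by
      refine List.filter_eq_self.mpr fun p hp => ?_
      have hne : p.1 ≠ c := fun he =>
        hcont ((PySem.Dict.contains_iff_mem_keys _ _).mpr
          (he ▸ PySem.Dict.mem_keys_of_mem_items _ hp))
      simp [hne]
    rw [hfil]
    exact List.perm_append_singleton _ _

theorem dictOf_values_nodup (l : List Char) : ((dictOf l).items.map (fun p => p.2)).Nodup := by
  induction l using List.reverseRecOn with
  | nil => simp [dictOf, PySem.Dict.empty]
  | append_singleton l c ih =>
    have hperm := (dictOf_items_perm l c).map (fun p => p.2)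
    rw [hperm.nodup_iff]
    simp only [List.map_cons, List.nodup_cons]
    constructor
    · intro hmem
      rcases List.mem_map.mp hmem with ⟨p, hp, he⟩
      have hrange := dictOf_values_range l p (List.mem_of_mem_filter hp)
      have : p.2 < (l.length : Int) := hrange.2
      omega
    · exact ih.sublist (List.filter_sublist.map _)

-- a reverse-sorted list with pairwise-distinct keys is strictly descending
theorem sorted_rev_pairwise_gt (xs : List (Char × Int))
    (h : (xs.map (fun p => p.2)).Nodup) :
    (PySem.List.sorted xs (fun kv => kv.2) true).Pairwise (fun a b => b.2 < a.2) := by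
  have h1 := PySem.List.sorted_pairwise_rev xs (fun kv => kv.2)
  have h2 : ((PySem.List.sorted xs (fun kv => kv.2) true).map (fun p => p.2)).Nodup :=
    (((PySem.List.sorted_perm xs (fun kv => kv.2) true).map (fun p => p.2)).nodup_iff).mpr h
  have h3 : (PySem.List.sorted xs (fun kv => kv.2) true).Pairwise (fun a b => a.2 ≠ b.2) :=
    List.pairwise_map.mp h2
  exact (h1.and h3).imp fun ⟨hle, hne⟩ => lt_of_le_of_ne hle hne.symm

-- the paper fact: B's sorted key list is dedup-keep-first of the reversed input
theorem sorted_dictOf_map_fst (l : List Char) :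
    (PySem.List.sorted (dictOf l).items (fun kv => kv.2) true).map (fun p => p.1)
      = dedupRev l.reverse := by
  induction l using List.reverseRecOn with
  | nil =>
    rw [show dictOf [] = PySem.Dict.empty from rfl]
    simp [PySem.Dict.empty, dedupRev,
      (PySem.List.sorted_eq_nil_iff ([] : List (Char × Int)) (fun kv => kv.2) true).mpr rfl]
  | append_singleton l c ih =>
    have hvnodup := dictOf_values_nodup l
    have hfilnodup : (((dictOf l).items.filter (fun p => decide (p.1 ≠ c))).map
        (fun p => p.2)).Nodup :=
      hvnodup.sublist (List.filter_sublist.map _)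
    -- name the sorted form of the new items list
    have hsorted : PySem.List.sorted (dictOf (l ++ [c])).items (fun kv => kv.2) true
        = (c, (l.length : Int)) ::
          PySem.List.sorted ((dictOf l).items.filter (fun p => decide (p.1 ≠ c)))
            (fun kv => kv.2) true := by
      apply PySem.List.sorted_rev_eq_of_perm_of_pairwise_gt
      · exact ((PySem.List.sorted_perm _ _ _).cons _).trans (dictOf_items_perm l c).symm
      · refine List.pairwise_cons.mpr ⟨?_, sorted_rev_pairwise_gt _ hfilnodup⟩
        intro p hp
        have hp' : p ∈ (dictOf l).items :=
          List.mem_of_mem_filter ((PySem.List.mem_sorted _ _ _ _).mp hp)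
        exact (dictOf_values_range l p hp').2
    -- sorting commutes with filtering away the c-keyed entry
    have hcomm : PySem.List.sorted ((dictOf l).items.filter (fun p => decide (p.1 ≠ c)))
          (fun kv => kv.2) true
        = (PySem.List.sorted (dictOf l).items (fun kv => kv.2) true).filter
            (fun p => decide (p.1 ≠ c)) := by
      apply PySem.List.sorted_rev_eq_of_perm_of_pairwise_gt
      · exact (PySem.List.sorted_perm _ _ _).filter _
      · exact (sorted_rev_pairwise_gt _ hvnodup).filter _
    rw [hsorted, List.map_cons, hcomm, List.reverse_append, List.reverse_singleton,
      List.singleton_append, dedupRev, ← ih, List.filter_map]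
    rfl

-- ===== VERDICT (by name: the statement is the Claim_ definition above) =====
theorem manipula_spec : Claim_equal_manipula := by
  intro cadena _
  unfold Spec_manipula manipula manipula_alt
  rw [← String.toList_inj]
  simp only [String.toList_ofList, PySem.Str.toList_join, List.map_map]
  rw [List.foldl_flip_cons_eq_append', List.append_nil, foldl_dedup_eq, List.nil_append,
    List.filter_eq_self.mpr (fun a _ => by simp)]
  rw [show ((fun s => s.toList) ∘ fun kv : Char × Int => String.ofList [kv.1])
      = (fun c => [c]) ∘ (fun kv : Char × Int => kv.1) from funext fun kv => by
        simp [String.toList_ofList]]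
  rw [← List.map_map, show "".toList = ([] : List Char) from rfl, PySem.Chars.join_nil_singletons]
  exact (sorted_dictOf_map_fst cadena.toList).symm
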